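-- pv_equiv track=rewrite | github.com/GotoRyusuke/EDGAR | Counters/russia_counter_lemma.py | count_words_in_text
-- ===== SOURCE A (Python) =====
-- from collections import Counter
--
-- def count_words_in_text(words_list: list, text_words: list):
--     '''
--     A func to count the word freq in a given text
--
--     Parameters
--     ----------
--     words_list: list
--         A list of words from dict
--     text_words:
--         A list of words in a given text
--
--     Returns
--     -------
--     dict_count: int
--         Word freq in the text
--
--     '''
--     dict_count = 0
--     words_counter = dict(Counter(text_words))
--     counter_keys = list(words_counter.keys())
--
--     for words in words_list:
--         if len(words) == 1:
--             kw = words[0]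
--             if '*' not in kw:
--                 if words[0] in words_counter.keys():
--                     dict_count += words_counter[words[0]]
--             else:
--                 kw = kw.split("*")[0]
--                 for key in counter_keys:
--                     if key[:len(kw)] == kw:
--                         dict_count += words_counter[key]
--         else:
--             for w_i in range(len(text_words)):
--                 flag = True
--                 for p_w_i, p_w in enumerate(words):
--                     if '*' not in p_w:
--                         if w_i + p_w_i >= len(text_words) or p_w != text_words[w_i + p_w_i]:
--                             flag = False
--                             break
--                     else:
--                         p_w = p_w.split('*')[0]
--                         if w_i + p_w_i >= len(text_words) or p_w != text_words[w_i + p_w_i][:len(p_w)]: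
--                             flag = False
--                             break
--                 if flag:
--                     dict_count += 1
--     return dict_count
-- ===== SOURCE B (Python) =====
-- def count_words_in_text(words_list: list, text_words: list):
--     # Uniform staged filtering: every dictionary entry (single word or phrase)
--     # is matched by successively filtering the list of candidate start
--     # positions, one pattern word per pass; no Counter/keys aggregation,
--     # no per-position inner loop with a break flag, no length-1 special case.
--     def pm(p, t):
--         if '*' in p:
--             return t.startswith(p.split('*')[0])
--         return p == t
--
--     n = len(text_words)
--     total = 0
--     for words in words_list:
--         cand = list(range(n))
--         for off, p in enumerate(words):
--             cand = [i for i in cand if i + off < n and pm(p, text_words[i + off])]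
--         total += len(cand)
--     return total
-- ===== Notes on version B (the rewrite author's own statement) =====
-- stated objective: alternative
-- what changed: B drops A's Counter/keys aggregation and per-position flag loop entirely: every dictionary entry (single word or phrase, uniformly, no length-1 special case) is counted by staged filtering of the candidate start-position list, one pattern word per pass.
import Mathlib
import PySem

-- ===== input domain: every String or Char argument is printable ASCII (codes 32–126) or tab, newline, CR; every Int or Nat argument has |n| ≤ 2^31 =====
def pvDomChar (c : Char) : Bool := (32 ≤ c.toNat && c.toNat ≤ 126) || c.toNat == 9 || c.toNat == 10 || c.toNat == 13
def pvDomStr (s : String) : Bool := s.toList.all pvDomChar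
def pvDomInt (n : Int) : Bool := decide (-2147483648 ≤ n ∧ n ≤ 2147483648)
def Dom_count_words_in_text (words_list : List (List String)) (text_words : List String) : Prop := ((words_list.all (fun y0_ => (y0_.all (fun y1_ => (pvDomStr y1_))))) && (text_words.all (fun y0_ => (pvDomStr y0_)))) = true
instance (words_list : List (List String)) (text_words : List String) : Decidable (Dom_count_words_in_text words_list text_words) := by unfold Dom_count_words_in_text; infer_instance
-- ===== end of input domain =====

-- B replaces A's Counter/keys aggregation and per-position flag loop by uniform staged filtering
-- of candidate start positions, one pattern word per pass; objective: alternative. Return value only.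

-- ===== PORT A =====
-- shared helper: p.split('*')[0] (the identical expression occurs in both Pythons)
def starPrefix (p : String) : String := ((PySem.Str.split? p "*").getD [p]).headD ""

-- A's inner phrase loop `for p_w_i, p_w in enumerate(words): … break`, carrying the absolute
-- index w_i + p_w_i as j; `flag` becomes the Bool result (break ⇒ false, loop end ⇒ true).
-- text_words[j] is guarded by the j ≥ len check exactly as in A, so getD never pads.
def aMatch : List String → List String → Nat → Bool
  | [], _, _ => true
  | p_w :: rest, text_words, j =>
    if !(PySem.Str.isIn "*" p_w) then
      if decide (j ≥ text_words.length) || (p_w != text_words.getD j "") then false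
      else aMatch rest text_words (j + 1)
    else
      let p := starPrefix p_w
      if decide (j ≥ text_words.length) ||
          (p != PySem.Str.slice (text_words.getD j "") none (some (PySem.Str.len p))) then false
      else aMatch rest text_words (j + 1)

def count_words_in_text (words_list : List (List String)) (text_words : List String) : Int :=
  let words_counter := PySem.Dict.counter text_words
  let counter_keys := words_counter.keys
  words_list.foldl (fun dict_count words =>
    if words.length == 1 then
      let kw := words.headD ""
      if !(PySem.Str.isIn "*" kw) then
        if words_counter.contains kw then dict_count + words_counter.getD kw 0 else dict_count
      else
        let kwp := starPrefix kw
        counter_keys.foldl (fun acc key =>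
          if PySem.Str.slice key none (some (PySem.Str.len kwp)) == kwp then
            acc + words_counter.getD key 0
          else acc) dict_count
    else
      (List.range text_words.length).foldl (fun acc w_i =>
        if aMatch words text_words w_i then acc + 1 else acc) dict_count)
    0

-- ===== PORT B =====
-- Source B's `pm(p, t)`
def pmatch (p t : String) : Bool :=
  if PySem.Str.isIn "*" p then PySem.Str.startswith t (starPrefix p) else p == t

-- Source B: per entry, cand = list(range(n)); one filter pass per (off, p) in enumerate(words);
-- `text_words[i + off]` is guarded by `i + off < n` (and i ≥ 0 from range), so getD/toNat are exact.
def count_words_in_text_alt (words_list : List (List String)) (text_words : List String) : Int :=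
  let n : Nat := text_words.length
  words_list.foldl (fun total words =>
    let cand :=
      (PySem.List.enumerate words 0).foldl (fun cand op =>
        cand.filter (fun i =>
          decide (i + op.1 < (n : Int)) && pmatch op.2 (text_words.getD (i + op.1).toNat "")))
        (PySem.List.pyRange 0 (n : Int) 1)
    total + (cand.length : Int)) 0

-- ===== PRECONDITION & SPEC =====
def Spec_count_words_in_text (words_list : List (List String)) (text_words : List String) (out : Int) : Prop := out = count_words_in_text_alt words_list text_words
instance (words_list : List (List String)) (text_words : List String) (out : Int) : Decidable (Spec_count_words_in_text words_list text_words out) := by unfold Spec_count_words_in_text; infer_instance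

-- ===== CLAIM (what is proved, stated in full; the proofs are below) =====
def Claim_equal_count_words_in_text : Prop := ∀ (words_list : List (List String)) (text_words : List String), Dom_count_words_in_text words_list text_words → Spec_count_words_in_text words_list text_words (count_words_in_text words_list text_words)

-- ===== LEMMAS AND PROOFS =====

-- 'key[:len(kw)] == kw' is 'key.startswith(kw)'
theorem slice_beq_eq_startswith (t pre : String) :
    (PySem.Str.slice t none (some (PySem.Str.len pre)) == pre) = PySem.Str.startswith t pre := by
  have h1 : (PySem.Str.slice t none (some (PySem.Str.len pre))).toList
      = t.toList.take pre.toList.length := by simp [pysem]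
  by_cases h : pre.toList <+: t.toList
  · have hs : PySem.Str.startswith t pre = true := by simp [pysem]; exact h
    rw [hs, beq_iff_eq, ← String.toList_inj, h1]
    exact (List.prefix_iff_eq_take.mp h).symm
  · have hs : PySem.Str.startswith t pre = false := by
      rw [← Bool.not_eq_true]; simp [pysem]; exact h
    rw [hs, beq_eq_false_iff_ne]
    intro he
    apply h
    apply List.prefix_iff_eq_take.mpr
    have := congrArg String.toList he
    rw [h1] at this
    exact this.symm

-- A's phrase matcher unfolds one pattern word into B's per-offset test
theorem aMatch_cons (p : String) (rest tw : List String) (j : Nat) :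
    aMatch (p :: rest) tw j
      = ((decide (j < tw.length) && pmatch p (tw.getD j "")) && aMatch rest tw (j + 1)) := by
  by_cases hj : j < tw.length
  · have hd : (decide (j ≥ tw.length)) = false := by simp; omega
    have hd' : (decide (j < tw.length)) = true := by simp [hj]
    by_cases hstar : PySem.Str.isIn "*" p = true
    · have hcond : (starPrefix p != PySem.Str.slice (tw.getD j "") none (some (PySem.Str.len (starPrefix p)))) = !(PySem.Str.startswith (tw.getD j "") (starPrefix p)) := by
        rw [← slice_beq_eq_startswith, bne, Bool.beq_comm]
      rw [aMatch]
      simp only [Bool.not_true, Bool.false_eq_true, if_false, hd, Bool.false_or, hcond,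
        hd', Bool.true_and, pmatch, hstar, if_true]
      cases hsw : PySem.Str.startswith (tw.getD j "") (starPrefix p) <;> simp
    · have hstar' : PySem.Str.isIn "*" p = false := by rw [← Bool.not_eq_true]; exact hstar
      rw [aMatch]
      simp only [hstar', Bool.not_false, if_true, hd, Bool.false_or, hd', Bool.true_and,
        pmatch, Bool.false_eq_true, if_false, bne]
      cases hsw : (p == tw.getD j "") <;> simp
  · have hd : (decide (j ≥ tw.length)) = true := by simp; omega
    have hd' : (decide (j < tw.length)) = false := by simp; omega
    rw [aMatch]
    by_cases hstar : PySem.Str.isIn "*" p = true <;> simp [hd, hd']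

-- B's filter chain over enumerate(words) computes, on nonnegative candidates, A's matcher
theorem stages_eq (tw : List String) :
    ∀ (ws : List String) (off : Nat) (cand : List Int), (∀ i ∈ cand, 0 ≤ i) →
      (PySem.List.enumerate ws (off : Int)).foldl (fun cand op =>
          cand.filter (fun i =>
            decide (i + op.1 < (tw.length : Int)) && pmatch op.2 (tw.getD (i + op.1).toNat "")))
          cand
        = cand.filter (fun i => aMatch ws tw (i.toNat + off)) := by
  intro ws
  induction ws with
  | nil =>
    intro off cand _
    simp [PySem.List.enumerate_nil, aMatch, List.filter_eq_self.mpr]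
  | cons p rest ih =>
    intro off cand hpos
    rw [PySem.List.enumerate_cons, List.foldl_cons]
    have hstep : (cand.filter (fun i =>
        decide (i + (off : Int) < (tw.length : Int)) && pmatch p (tw.getD (i + (off : Int)).toNat "")) : List Int)
        = cand.filter (fun i =>
            decide (i.toNat + off < tw.length) && pmatch p (tw.getD (i.toNat + off) "")) := by
      apply List.filter_congr
      intro i hi
      have h0 : 0 ≤ i := hpos i hi
      have h1 : (i + (off : Int)).toNat = i.toNat + off := by omega
      have h2 : (decide (i + (off : Int) < (tw.length : Int))) = (decide (i.toNat + off < tw.length)) := by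
        rcases Decidable.em (i.toNat + off < tw.length) with h | h <;>
          simp [h] <;> omega
      rw [h1, h2]
    have hoff : ((off : Int) + 1) = ((off + 1 : Nat) : Int) := by push_cast; ring
    rw [hstep, hoff, ih (off + 1) _ (fun i hi => hpos i (List.mem_of_mem_filter hi)),
      List.filter_filter]
    apply List.filter_congr
    intro i hi
    rw [aMatch_cons]
    have : i.toNat + (off + 1) = i.toNat + off + 1 := by omega
    rw [this]
    cases h1 : (decide (i.toNat + off < tw.length) && pmatch p (tw.getD (i.toNat + off) "")) <;>
      cases h2 : aMatch rest tw (i.toNat + off + 1) <;> simp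

-- indexing lemma: counting matching positions is counting matching words
theorem countP_range_getD (tw : List String) (Q : String → Bool) :
    (List.range tw.length).countP (fun k => Q (tw.getD k "")) = tw.countP Q := by
  induction tw with
  | nil => simp
  | cons x rest ih =>
    rw [List.length_cons, List.range_succ_eq_map, List.countP_cons, List.countP_map]
    have : ((fun k => Q ((x :: rest).getD k "")) ∘ Nat.succ) = (fun k => Q (rest.getD k "")) := by
      funext k; simp
    rw [this, ih]
    by_cases h : Q x = true <;> simp [h]

-- a guarded accumulate-foldl is its start plus a sum
theorem foldl_if_add {α : Type} (P : α → Bool) (f : α → Int) :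
    ∀ (keys : List α) (acc : Int),
      keys.foldl (fun a k => if P k then a + f k else a) acc
        = acc + (keys.map (fun k => if P k then f k else 0)).sum := by
  intro keys
  induction keys with
  | nil => intro acc; simp
  | cons k ks ih =>
    intro acc
    by_cases h : P k = true <;> simp [h, ih, add_assoc]

theorem foldl_congr_fun {α β : Type} (f g : β → α → β) (h : ∀ a k, f a k = g a k) :
    ∀ (l : List α) (acc : β), l.foldl f acc = l.foldl g acc := by
  intro l
  induction l with
  | nil => intro acc; rfl
  | cons k ks ih => intro acc; simp only [List.foldl_cons]; rw [h, ih]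

theorem sum_one_of_nodup (P : String → Bool) (x : String) :
    ∀ (keys : List String), keys.Nodup → x ∈ keys →
      (keys.map (fun k => if P k then (if x = k then (1 : Int) else 0) else 0)).sum
        = if P x then 1 else 0 := by
  intro keys
  induction keys with
  | nil => intro _ hx; cases hx
  | cons k ks ih =>
    intro hnd hx
    rw [List.nodup_cons] at hnd
    rcases List.mem_cons.mp hx with rfl | hx'
    · have hz : (ks.map (fun k => if P k then (if x = k then (1 : Int) else 0) else 0)).sum = 0 := by
        apply List.sum_eq_zero
        intro y hy
        rcases List.mem_map.mp hy with ⟨k', hk', rfl⟩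
        have : x ≠ k' := fun he => hnd.1 (he ▸ hk')
        simp [this]
      simp [hz]
    · have : x ≠ k := fun he => by rw [he] at hx'; exact hnd.1 hx'
      simp [this, ih hnd.2 hx']

-- summing each key's count over a nodup key cover is counting directly
theorem sum_counts_eq_countP (P : String → Bool) :
    ∀ (xs keys : List String), keys.Nodup → (∀ x ∈ xs, x ∈ keys) →
      (keys.map (fun k => if P k then (xs.count k : Int) else 0)).sum = (xs.countP P : Int) := by
  intro xs
  induction xs with
  | nil => intro keys _ _; simp
  | cons x rest ih =>
    intro keys hnd hmem
    have hx : x ∈ keys := hmem x (List.mem_cons_self ..)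
    have hsplit : ∀ k, (if P k then ((x :: rest).count k : Int) else 0)
        = (if P k then (rest.count k : Int) else 0) + (if P k then (if x = k then (1:Int) else 0) else 0) := by
      intro k
      by_cases hp : P k = true
      · by_cases hxk : x = k <;> simp [hp, hxk]
      · simp [hp]
    calc (keys.map (fun k => if P k then ((x :: rest).count k : Int) else 0)).sum
        = (keys.map (fun k => (if P k then (rest.count k : Int) else 0) + (if P k then (if x = k then (1:Int) else 0) else 0))).sum := by
          apply congrArg; apply List.map_congr_left; intro k _; exact hsplit k
      _ = (keys.map (fun k => if P k then (rest.count k : Int) else 0)).sum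
            + (keys.map (fun k => if P k then (if x = k then (1:Int) else 0) else 0)).sum := by
          rw [← List.sum_map_add]
      _ = (rest.countP P : Int) + (if P x then 1 else 0) := by
          rw [ih keys hnd (fun y hy => hmem y (List.mem_cons_of_mem _ hy)), sum_one_of_nodup P x keys hnd hx]
      _ = ((x :: rest).countP P : Int) := by
          by_cases hp : P x = true <;> simp [hp]

-- B's per-entry contribution is the number of positions where A's matcher fires
theorem bEntry_eq_countP (tw words : List String) :
    ((PySem.List.enumerate words 0).foldl (fun cand op =>
        cand.filter (fun i =>
          decide (i + op.1 < (tw.length : Int)) && pmatch op.2 (tw.getD (i + op.1).toNat "")))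
        (PySem.List.pyRange 0 (tw.length : Int) 1)).length
      = (List.range tw.length).countP (fun k => aMatch words tw k) := by
  have h0 : PySem.List.pyRange 0 (tw.length : Int) 1 = (List.range tw.length).map (fun k : Nat => (k : Int)) := by
    rw [PySem.List.pyRange_one]
    simp only [sub_zero, Int.toNat_natCast, zero_add]
  have hpos : ∀ i ∈ PySem.List.pyRange 0 (tw.length : Int) 1, (0:Int) ≤ i := by
    intro i hi
    exact (PySem.List.mem_pyRange_one.mp hi).1
  have := stages_eq tw words 0 (PySem.List.pyRange 0 (tw.length : Int) 1) hpos
  rw [(by norm_num : ((0 : Nat) : Int) = 0)] at this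
  rw [this, ← List.countP_eq_length_filter, h0, List.countP_map]
  apply List.countP_congr
  intro k _
  simp

-- one words_list entry contributes the same amount in A and in B
theorem step_eq (tw : List String) (acc : Int) (words : List String) :
    (if words.length == 1 then
      let kw := words.headD ""
      if !(PySem.Str.isIn "*" kw) then
        if (PySem.Dict.counter tw).contains kw then acc + (PySem.Dict.counter tw).getD kw 0 else acc
      else
        let kwp := starPrefix kw
        (PySem.Dict.counter tw).keys.foldl (fun a key =>
          if PySem.Str.slice key none (some (PySem.Str.len kwp)) == kwp then
            a + (PySem.Dict.counter tw).getD key 0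
          else a) acc
    else
      (List.range tw.length).foldl (fun a w_i =>
        if aMatch words tw w_i then a + 1 else a) acc)
    =
    acc + (((List.range tw.length).countP (fun k => aMatch words tw k) : Nat) : Int) := by
  by_cases hlen : (words.length == 1) = true
  · obtain ⟨kw, rfl⟩ := List.length_eq_one_iff.mp (beq_iff_eq.mp hlen)
    have hone : (List.range tw.length).countP (fun k => aMatch [kw] tw k)
        = tw.countP (fun t => pmatch kw t) := by
      have h1 : (List.range tw.length).countP (fun k => aMatch [kw] tw k)
          = (List.range tw.length).countP (fun k => pmatch kw (tw.getD k "")) := by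
        apply List.countP_congr
        intro k hk
        have hk' : k < tw.length := List.mem_range.mp hk
        rw [aMatch_cons]
        simp [aMatch, hk']
      rw [h1, countP_range_getD]
    simp only [hlen, if_true, List.headD_cons, hone]
    by_cases hstar : PySem.Str.isIn "*" kw = true
    · simp only [hstar, Bool.not_true, Bool.false_eq_true, if_false]
      have hkeys : (PySem.Dict.counter tw).keys = PySem.List.dedup tw := by
        rw [PySem.Dict.keys_counter, ← PySem.List.dedup_eq_ofList]
      rw [hkeys]
      refine Eq.trans (foldl_congr_fun _
          (fun (a : Int) (key : String) =>
            if PySem.Str.startswith key (starPrefix kw) then a + (tw.count key : Int) else a)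
          (fun a key => by simp only [slice_beq_eq_startswith, PySem.Dict.getD_counter])
          (PySem.List.dedup tw) acc) ?_
      rw [foldl_if_add (fun key => PySem.Str.startswith key (starPrefix kw)) (fun key => (tw.count key : Int)),
        sum_counts_eq_countP _ tw (PySem.List.dedup tw) (PySem.List.nodup_dedup tw)
          (fun x hx => (PySem.List.mem_dedup ..).mpr hx)]
      have : tw.countP (fun t => pmatch kw t)
          = tw.countP (fun t => PySem.Str.startswith t (starPrefix kw)) :=
        List.countP_congr (fun x _ => by simp only [pmatch, hstar, if_true])
      rw [this]
    · have hstar' : PySem.Str.isIn "*" kw = false := by rw [← Bool.not_eq_true]; exact hstar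
      simp only [hstar', Bool.not_false, if_true]
      rw [PySem.Dict.contains_counter, PySem.Dict.getD_counter]
      have hpred : tw.countP (fun t => pmatch kw t) = tw.count kw := by
        have h1 : tw.countP (fun t => pmatch kw t) = tw.countP (fun t => t == kw) :=
          List.countP_congr (fun x _ => by
            simp only [pmatch, hstar', Bool.false_eq_true, if_false, Bool.beq_comm])
        rw [h1]; simp [List.count]
      rw [hpred]
      cases hc : tw.contains kw
      · have hnm : ¬ kw ∈ tw := by simpa using hc
        have : tw.count kw = 0 := List.count_eq_zero.mpr hnm
        simp [this]
      · rfl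
  · have hlen' : (words.length == 1) = false := by rw [← Bool.not_eq_true]; exact hlen
    simp only [hlen', Bool.false_eq_true, if_false]
    rw [PySem.List.foldl_if_add_one]

-- the two outer folds over words_list agree from any start
theorem foldl_steps_eq (tw : List String) :
    ∀ (wl : List (List String)) (start : Int),
      wl.foldl (fun dict_count words =>
        if words.length == 1 then
          let kw := words.headD ""
          if !(PySem.Str.isIn "*" kw) then
            if (PySem.Dict.counter tw).contains kw then dict_count + (PySem.Dict.counter tw).getD kw 0 else dict_count
          else
            let kwp := starPrefix kw
            (PySem.Dict.counter tw).keys.foldl (fun acc key =>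
              if PySem.Str.slice key none (some (PySem.Str.len kwp)) == kwp then
                acc + (PySem.Dict.counter tw).getD key 0
              else acc) dict_count
        else
          (List.range tw.length).foldl (fun acc w_i =>
            if aMatch words tw w_i then acc + 1 else acc) dict_count) start
      =
      wl.foldl (fun total words =>
        let cand :=
          (PySem.List.enumerate words 0).foldl (fun cand op =>
            cand.filter (fun i =>
              decide (i + op.1 < (tw.length : Int)) && pmatch op.2 (tw.getD (i + op.1).toNat "")))
            (PySem.List.pyRange 0 (tw.length : Int) 1)
        total + (cand.length : Int)) start := by
  intro wl
  induction wl with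
  | nil => intro start; rfl
  | cons w ws ih =>
    intro start
    simp only [List.foldl_cons]
    rw [step_eq, ih, bEntry_eq_countP]

-- ===== VERDICT (by name: the statement is the Claim_ definition above) =====
set_option maxHeartbeats 1000000 in
theorem count_words_in_text_spec : Claim_equal_count_words_in_text := by
  intro words_list text_words _
  show count_words_in_text words_list text_words = count_words_in_text_alt words_list text_words
  unfold count_words_in_text count_words_in_text_alt
  exact foldl_steps_eq text_words words_list 0
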